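-- pv_equiv track=rewrite | github.com/Kushal-Raptor-X/ResQ-VoiceForward | realtime_backend/agents/analysis_agent.py | _keyword_risk
-- ===== SOURCE A (Python) =====
-- CRITICAL_KEYWORDS = [
--     "kill myself", "suicide", "want to die", "end my life",
--     "take my life", "not worth living", "better off dead",
--     "end it all", "no reason to live", "final goodbye",
-- ]
--
-- HIGH_KEYWORDS = [
--     "chest pain", "can't breathe", "heart attack", "stroke",
--     "overdose", "bleeding", "unconscious", "emergency",
--     "hurt myself", "self harm", "cut myself",
--     "giving up", "hopeless", "no way out",
-- ]
--
-- MEDIUM_KEYWORDS = [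
--     "feeling low", "depressed", "anxious", "panic",
--     "scared", "alone", "nobody cares", "worthless",
--     "can't cope", "overwhelmed", "crying",
-- ]
--
-- def _keyword_risk(text: str) -> tuple[str, list[str]]:
--     """Fast rule-based keyword scan. Returns (risk_level, matched_signals)."""
--     lower = text.lower()
--     signals = []
--
--     for kw in CRITICAL_KEYWORDS:
--         if kw in lower:
--             signals.append(f"critical keyword: '{kw}'")
--
--     for kw in HIGH_KEYWORDS:
--         if kw in lower:
--             signals.append(f"high-risk keyword: '{kw}'")
--
--     for kw in MEDIUM_KEYWORDS:
--         if kw in lower: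
--             signals.append(f"distress keyword: '{kw}'")
--
--     if any("critical keyword" in s for s in signals):
--         return "CRITICAL", signals
--     if any("high-risk keyword" in s for s in signals):
--         return "HIGH", signals
--     if any("distress keyword" in s for s in signals):
--         return "MEDIUM", signals
--     return "LOW", signals
-- ===== SOURCE B (Python) =====
-- CRITICAL_KEYWORDS = [
--     "kill myself", "suicide", "want to die", "end my life",
--     "take my life", "not worth living", "better off dead",
--     "end it all", "no reason to live", "final goodbye",
-- ]
--
-- HIGH_KEYWORDS = [
--     "chest pain", "can't breathe", "heart attack", "stroke",
--     "overdose", "bleeding", "unconscious", "emergency",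
--     "hurt myself", "self harm", "cut myself",
--     "giving up", "hopeless", "no way out",
-- ]
--
-- MEDIUM_KEYWORDS = [
--     "feeling low", "depressed", "anxious", "panic",
--     "scared", "alone", "nobody cares", "worthless",
--     "can't cope", "overwhelmed", "crying",
-- ]
--
-- _ALL_KEYWORDS = CRITICAL_KEYWORDS + HIGH_KEYWORDS + MEDIUM_KEYWORDS
--
-- # index the keywords by their first character, built once
-- _BY_FIRST = {}
-- for _kw in _ALL_KEYWORDS:
--     _BY_FIRST.setdefault(_kw[0], []).append(_kw)
--
-- def _keyword_risk(text: str) -> tuple[str, list[str]]: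
--     """Position-driven scan: walk the lowered text once; at each position consult the
--     first-character index and collect the keywords that start there (a keyword occurs
--     in the text iff it starts at some position); then format the hit set per category."""
--     lower = text.lower()
--     hits = set()
--     for i in range(len(lower)):
--         for kw in _BY_FIRST.get(lower[i], ()):
--             if kw not in hits and lower.startswith(kw, i):
--                 hits.add(kw)
--     crit = [f"critical keyword: '{kw}'" for kw in CRITICAL_KEYWORDS if kw in hits]
--     high = [f"high-risk keyword: '{kw}'" for kw in HIGH_KEYWORDS if kw in hits]
--     med = [f"distress keyword: '{kw}'" for kw in MEDIUM_KEYWORDS if kw in hits]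
--     level = "CRITICAL" if crit else "HIGH" if high else "MEDIUM" if med else "LOW"
--     return level, crit + high + med
-- ===== Notes on version B (the rewrite author's own statement) =====
-- stated objective: alternative
-- what changed: B replaces A's per-keyword built-in substring searches plus the any() re-scan of the signal strings by a position-driven scan: it walks the lowered text once, consulting a first-character index of the keywords to collect the set of keywords starting at each position, then formats that hit set per category and derives the level from which category list is nonempty.
import Mathlib
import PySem

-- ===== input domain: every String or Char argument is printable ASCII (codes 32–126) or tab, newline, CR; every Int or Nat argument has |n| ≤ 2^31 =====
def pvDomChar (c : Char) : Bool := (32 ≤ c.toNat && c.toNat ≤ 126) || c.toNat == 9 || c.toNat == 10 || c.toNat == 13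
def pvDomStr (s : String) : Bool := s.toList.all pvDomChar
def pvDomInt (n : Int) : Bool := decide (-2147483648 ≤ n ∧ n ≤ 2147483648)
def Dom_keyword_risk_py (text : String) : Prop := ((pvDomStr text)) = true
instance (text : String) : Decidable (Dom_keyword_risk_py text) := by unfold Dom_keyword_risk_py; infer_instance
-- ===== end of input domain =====

-- B walks the lowered text once, consulting a first-character index of the keywords to
-- collect the set of keywords starting at each position, then formats the hit set per
-- category (objective: alternative).

-- ===== PORT A =====
def CRITICAL_KEYWORDS : List String := [
  "kill myself", "suicide", "want to die", "end my life",
  "take my life", "not worth living", "better off dead",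
  "end it all", "no reason to live", "final goodbye"]

def HIGH_KEYWORDS : List String := [
  "chest pain", "can't breathe", "heart attack", "stroke",
  "overdose", "bleeding", "unconscious", "emergency",
  "hurt myself", "self harm", "cut myself",
  "giving up", "hopeless", "no way out"]

def MEDIUM_KEYWORDS : List String := [
  "feeling low", "depressed", "anxious", "panic",
  "scared", "alone", "nobody cares", "worthless",
  "can't cope", "overwhelmed", "crying"]

def keyword_risk_py (text : String) : String × List String :=
  let lower := PySem.Str.lower text
  let signals : List String := []
  let signals := CRITICAL_KEYWORDS.foldl (fun acc kw =>
    if PySem.Str.isIn kw lower then acc ++ ["critical keyword: '" ++ kw ++ "'"] else acc) signals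
  let signals := HIGH_KEYWORDS.foldl (fun acc kw =>
    if PySem.Str.isIn kw lower then acc ++ ["high-risk keyword: '" ++ kw ++ "'"] else acc) signals
  let signals := MEDIUM_KEYWORDS.foldl (fun acc kw =>
    if PySem.Str.isIn kw lower then acc ++ ["distress keyword: '" ++ kw ++ "'"] else acc) signals
  if signals.any (fun s => PySem.Str.isIn "critical keyword" s) then ("CRITICAL", signals)
  else if signals.any (fun s => PySem.Str.isIn "high-risk keyword" s) then ("HIGH", signals)
  else if signals.any (fun s => PySem.Str.isIn "distress keyword" s) then ("MEDIUM", signals)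
  else ("LOW", signals)

-- ===== PORT B =====
def pvAllKeywords : List String := CRITICAL_KEYWORDS ++ HIGH_KEYWORDS ++ MEDIUM_KEYWORDS

-- _BY_FIRST: keywords grouped by first character (kw[0] ported as headD; every table
-- keyword is nonempty, so headD is exact); setdefault(...).append = modify with ++ [kw]
def pvByFirst : PySem.Dict Char (List String) :=
  pvAllKeywords.foldl (fun d kw => d.modify (kw.toList.headD ' ') [] (fun l => l ++ [kw])) PySem.Dict.empty

-- B's for-loop over positions i (the suffix c :: t is lower[i:]; lower.startswith(kw, i)
-- is exactly 'kw.toList is a prefix of that suffix')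
def pvScan : List Char → PySem.Set String → PySem.Set String
  | [], hits => hits
  | c :: t, hits =>
      pvScan t ((PySem.Dict.getD pvByFirst c []).foldl (fun h kw =>
        if !PySem.Set.contains h kw && PySem.Chars.startswith (c :: t) kw.toList
        then PySem.Set.add h kw else h) hits)

def keyword_risk_py_alt (text : String) : String × List String :=
  let lower := PySem.Str.lower text
  let hits := pvScan lower.toList PySem.Set.empty
  let crit := (CRITICAL_KEYWORDS.filter (fun kw => PySem.Set.contains hits kw)).map
    (fun kw => "critical keyword: '" ++ kw ++ "'")
  let high := (HIGH_KEYWORDS.filter (fun kw => PySem.Set.contains hits kw)).map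
    (fun kw => "high-risk keyword: '" ++ kw ++ "'")
  let med := (MEDIUM_KEYWORDS.filter (fun kw => PySem.Set.contains hits kw)).map
    (fun kw => "distress keyword: '" ++ kw ++ "'")
  let level := if !crit.isEmpty then "CRITICAL"
    else if !high.isEmpty then "HIGH"
    else if !med.isEmpty then "MEDIUM" else "LOW"
  (level, crit ++ high ++ med)

-- ===== PRECONDITION & SPEC =====
def Spec_keyword_risk_py (text : String) (out : String × List String) : Prop := out = keyword_risk_py_alt text
instance (text : String) (out : String × List String) : Decidable (Spec_keyword_risk_py text out) := by unfold Spec_keyword_risk_py; infer_instance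

-- ===== CLAIM =====
def Claim_equal_keyword_risk_py : Prop := ∀ (text : String), Dom_keyword_risk_py text → Spec_keyword_risk_py text (keyword_risk_py text)

-- ===== LEMMAS AND PROOFS =====

-- membership after one pvStep over an arbitrary keyword list
theorem mem_foldl_step (l : List String) (suffix : List Char) (hits : PySem.Set String) (kw : String) :
    kw ∈ l.foldl (fun h k =>
      if !PySem.Set.contains h k && PySem.Chars.startswith suffix k.toList
      then PySem.Set.add h k else h) hits ↔
      kw ∈ hits ∨ (kw ∈ l ∧ kw.toList <+: suffix) := by
  induction l generalizing hits with
  | nil => simp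
  | cons a t ih =>
    simp only [List.foldl_cons]
    rw [ih, List.mem_cons]
    by_cases hc : PySem.Set.contains hits a = true
    · have ha : a ∈ hits := (PySem.Set.contains_iff hits a).mp hc
      rw [if_neg (by simp [ha])]
      constructor
      · rintro (h | ⟨h1, h2⟩)
        · exact Or.inl h
        · exact Or.inr ⟨Or.inr h1, h2⟩
      · rintro (h | ⟨(rfl | h1), h2⟩)
        · exact Or.inl h
        · exact Or.inl ha
        · exact Or.inr ⟨h1, h2⟩
    · rw [Bool.not_eq_true] at hc
      by_cases hs : PySem.Chars.startswith suffix a.toList = true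
      · have hp : a.toList <+: suffix := (PySem.Chars.startswith_iff _ _).mp hs
        have hna : a ∉ hits := fun h => by
          simp at hc; exact hc h
        rw [if_pos (by simp [hna, hs]), PySem.Set.mem_add]
        constructor
        · rintro ((h | rfl) | ⟨h1, h2⟩)
          · exact Or.inl h
          · exact Or.inr ⟨Or.inl rfl, hp⟩
          · exact Or.inr ⟨Or.inr h1, h2⟩
        · rintro (h | ⟨(rfl | h1), h2⟩)
          · exact Or.inl (Or.inl h)
          · exact Or.inl (Or.inr rfl)
          · exact Or.inr ⟨h1, h2⟩
      · rw [Bool.not_eq_true] at hs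
        have hnp : ¬ a.toList <+: suffix := fun h => by
          simp [(PySem.Chars.startswith_iff _ _).mpr h] at hs
        rw [if_neg (by simp [hs])]
        constructor
        · rintro (h | ⟨h1, h2⟩)
          · exact Or.inl h
          · exact Or.inr ⟨Or.inr h1, h2⟩
        · rintro (h | ⟨(rfl | h1), h2⟩)
          · exact Or.inl h
          · exact absurd h2 hnp
          · exact Or.inr ⟨h1, h2⟩

-- the first-character groups are exactly the filters of the keyword table
theorem group_eq (c : Char) :
    PySem.Dict.getD pvByFirst c [] = pvAllKeywords.filter (fun kw => kw.toList.headD ' ' == c) := by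
  have h : pvByFirst = (pvAllKeywords.map (fun kw => (kw.toList.headD ' ', kw))).foldl
      (fun d p => d.modify p.1 [] (fun l => l ++ [p.2])) PySem.Dict.empty := by
    rw [List.foldl_map]
    rfl
  rw [h, PySem.Dict.getD_foldl_modify_append, PySem.Dict.getD_empty, List.nil_append,
    List.filter_map, List.map_map]
  simp [Function.comp_def]

theorem mem_group (c : Char) (kw : String) :
    kw ∈ PySem.Dict.getD pvByFirst c [] ↔ kw ∈ pvAllKeywords ∧ kw.toList.headD ' ' = c := by
  rw [group_eq, List.mem_filter]
  simp

-- every table keyword is nonempty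
theorem all_ne_nil : ∀ kw ∈ pvAllKeywords, kw.toList ≠ [] := by decide

-- membership after the whole position scan: hits, plus table keywords occurring as infix
theorem mem_pvScan (s : List Char) (hits : PySem.Set String) (kw : String) :
    kw ∈ pvScan s hits ↔
      kw ∈ hits ∨ (kw ∈ pvAllKeywords ∧ kw.toList <:+: s) := by
  induction s generalizing hits with
  | nil =>
    rw [pvScan]
    constructor
    · exact Or.inl
    · rintro (h | ⟨h1, h2⟩)
      · exact h
      · exact absurd (List.eq_nil_of_infix_nil h2) (all_ne_nil kw h1)
  | cons c t ih =>
    rw [pvScan, ih, mem_foldl_step, List.infix_cons_iff]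
    constructor
    · rintro ((h | ⟨hg, hp⟩) | ⟨h1, h2⟩)
      · exact Or.inl h
      · exact Or.inr ⟨(mem_group c kw).mp hg |>.1, Or.inl hp⟩
      · exact Or.inr ⟨h1, Or.inr h2⟩
    · rintro (h | ⟨h1, hp | h2⟩)
      · exact Or.inl (Or.inl h)
      · refine Or.inl (Or.inr ⟨(mem_group c kw).mpr ⟨h1, ?_⟩, hp⟩)
        cases hkw : kw.toList with
        | nil => exact absurd hkw (all_ne_nil kw h1)
        | cons x xs =>
          rw [hkw] at hp
          rw [List.headD_cons]
          exact (List.cons_prefix_cons.mp hp).1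
      · exact Or.inr ⟨h1, h2⟩

-- for a keyword of the tables, membership in the final hit set is exactly Python's 'kw in lower'
theorem contains_pvScan (lower : String) (kw : String) (h : kw ∈ pvAllKeywords) :
    PySem.Set.contains (pvScan lower.toList PySem.Set.empty) kw = PySem.Str.isIn kw lower := by
  rw [Bool.eq_iff_iff, PySem.Set.contains_iff, PySem.Str.isIn_iff_infix, mem_pvScan]
  simp [PySem.Set.empty, h]

-- Each signal string contains its own category label and neither of the other two labels.
theorem critF : CRITICAL_KEYWORDS.all (fun kw =>
    PySem.Str.isIn "critical keyword" ("critical keyword: '" ++ kw ++ "'") &&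
    !PySem.Str.isIn "high-risk keyword" ("critical keyword: '" ++ kw ++ "'") &&
    !PySem.Str.isIn "distress keyword" ("critical keyword: '" ++ kw ++ "'")) = true := by decide

theorem highF : HIGH_KEYWORDS.all (fun kw =>
    !PySem.Str.isIn "critical keyword" ("high-risk keyword: '" ++ kw ++ "'") &&
    PySem.Str.isIn "high-risk keyword" ("high-risk keyword: '" ++ kw ++ "'") &&
    !PySem.Str.isIn "distress keyword" ("high-risk keyword: '" ++ kw ++ "'")) = true := by decide

theorem medF : MEDIUM_KEYWORDS.all (fun kw =>
    !PySem.Str.isIn "critical keyword" ("distress keyword: '" ++ kw ++ "'") &&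
    !PySem.Str.isIn "high-risk keyword" ("distress keyword: '" ++ kw ++ "'") &&
    PySem.Str.isIn "distress keyword" ("distress keyword: '" ++ kw ++ "'")) = true := by decide

-- any over a mapped list where P∘f is constant on the source list
theorem any_map_of_forall {α : Type} (l : List α) (f : α → String) (P : String → Bool)
    (b : Bool) (h : ∀ x ∈ l, P (f x) = b) : (l.map f).any P = (b && !l.isEmpty) := by
  induction l with
  | nil => simp
  | cons a t ih =>
    simp only [List.map_cons, List.any_cons, h a (List.mem_cons_self),
      ih (fun x hx => h x (List.mem_cons_of_mem a hx)), List.isEmpty_cons]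
    cases b <;> simp

-- ===== VERDICT =====
theorem keyword_risk_py_spec : Claim_equal_keyword_risk_py := by
  intro text _
  unfold Spec_keyword_risk_py keyword_risk_py keyword_risk_py_alt
  set lower := PySem.Str.lower text with hl
  simp only [PySem.List.foldl_append_if, List.nil_append, List.append_assoc]
  have hmemC : ∀ kw ∈ CRITICAL_KEYWORDS, (fun kw => PySem.Set.contains (pvScan lower.toList PySem.Set.empty) kw) kw = (fun kw => PySem.Str.isIn kw lower) kw := fun kw hk =>
    contains_pvScan lower kw (List.mem_append_left _ (List.mem_append_left _ hk))
  have hmemH : ∀ kw ∈ HIGH_KEYWORDS, (fun kw => PySem.Set.contains (pvScan lower.toList PySem.Set.empty) kw) kw = (fun kw => PySem.Str.isIn kw lower) kw := fun kw hk =>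
    contains_pvScan lower kw (List.mem_append_left _ (List.mem_append_right _ hk))
  have hmemM : ∀ kw ∈ MEDIUM_KEYWORDS, (fun kw => PySem.Set.contains (pvScan lower.toList PySem.Set.empty) kw) kw = (fun kw => PySem.Str.isIn kw lower) kw := fun kw hk =>
    contains_pvScan lower kw (List.mem_append_right _ hk)
  rw [List.filter_congr hmemC, List.filter_congr hmemH, List.filter_congr hmemM]
  set cF := CRITICAL_KEYWORDS.filter (fun kw => PySem.Str.isIn kw lower) with hc
  set hF := HIGH_KEYWORDS.filter (fun kw => PySem.Str.isIn kw lower) with hh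
  set mF := MEDIUM_KEYWORDS.filter (fun kw => PySem.Str.isIn kw lower) with hm
  have memc : ∀ kw ∈ cF, kw ∈ CRITICAL_KEYWORDS := fun kw hk => (List.mem_filter.mp hk).1
  have memh : ∀ kw ∈ hF, kw ∈ HIGH_KEYWORDS := fun kw hk => (List.mem_filter.mp hk).1
  have memm : ∀ kw ∈ mF, kw ∈ MEDIUM_KEYWORDS := fun kw hk => (List.mem_filter.mp hk).1
  have c1 : ∀ kw ∈ cF, PySem.Str.isIn "critical keyword" ("critical keyword: '" ++ kw ++ "'") = true := fun x hx => by
    have := List.all_eq_true.mp critF x (memc x hx)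
    simp only [Bool.and_eq_true, Bool.not_eq_true'] at this; exact this.1.1
  have c2 : ∀ kw ∈ cF, PySem.Str.isIn "high-risk keyword" ("critical keyword: '" ++ kw ++ "'") = false := fun x hx => by
    have := List.all_eq_true.mp critF x (memc x hx)
    simp only [Bool.and_eq_true, Bool.not_eq_true'] at this; exact this.1.2
  have c3 : ∀ kw ∈ cF, PySem.Str.isIn "distress keyword" ("critical keyword: '" ++ kw ++ "'") = false := fun x hx => by
    have := List.all_eq_true.mp critF x (memc x hx)
    simp only [Bool.and_eq_true, Bool.not_eq_true'] at this; exact this.2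
  have h1 : ∀ kw ∈ hF, PySem.Str.isIn "critical keyword" ("high-risk keyword: '" ++ kw ++ "'") = false := fun x hx => by
    have := List.all_eq_true.mp highF x (memh x hx)
    simp only [Bool.and_eq_true, Bool.not_eq_true'] at this; exact this.1.1
  have h2 : ∀ kw ∈ hF, PySem.Str.isIn "high-risk keyword" ("high-risk keyword: '" ++ kw ++ "'") = true := fun x hx => by
    have := List.all_eq_true.mp highF x (memh x hx)
    simp only [Bool.and_eq_true, Bool.not_eq_true'] at this; exact this.1.2
  have h3 : ∀ kw ∈ hF, PySem.Str.isIn "distress keyword" ("high-risk keyword: '" ++ kw ++ "'") = false := fun x hx => by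
    have := List.all_eq_true.mp highF x (memh x hx)
    simp only [Bool.and_eq_true, Bool.not_eq_true'] at this; exact this.2
  have m1 : ∀ kw ∈ mF, PySem.Str.isIn "critical keyword" ("distress keyword: '" ++ kw ++ "'") = false := fun x hx => by
    have := List.all_eq_true.mp medF x (memm x hx)
    simp only [Bool.and_eq_true, Bool.not_eq_true'] at this; exact this.1.1
  have m2 : ∀ kw ∈ mF, PySem.Str.isIn "high-risk keyword" ("distress keyword: '" ++ kw ++ "'") = false := fun x hx => by
    have := List.all_eq_true.mp medF x (memm x hx)
    simp only [Bool.and_eq_true, Bool.not_eq_true'] at this; exact this.1.2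
  have m3 : ∀ kw ∈ mF, PySem.Str.isIn "distress keyword" ("distress keyword: '" ++ kw ++ "'") = true := fun x hx => by
    have := List.all_eq_true.mp medF x (memm x hx)
    simp only [Bool.and_eq_true, Bool.not_eq_true'] at this; exact this.2
  simp only [List.any_append,
    any_map_of_forall cF _ _ true c1, any_map_of_forall hF _ _ false h1,
    any_map_of_forall mF _ _ false m1, any_map_of_forall cF _ _ false c2,
    any_map_of_forall hF _ _ true h2, any_map_of_forall mF _ _ false m2,
    any_map_of_forall cF _ _ false c3, any_map_of_forall hF _ _ false h3,
    any_map_of_forall mF _ _ true m3, List.isEmpty_map]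
  by_cases e1 : cF.isEmpty <;> by_cases e2 : hF.isEmpty <;> by_cases e3 : mF.isEmpty <;>
    simp [e1, e2, e3]
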